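-- pv_equiv track=rewrite | github.com/DrDonut326/AdventofCode | 2017/Day 21 Try 2.py | rule_string_to_2d_array
-- ===== SOURCE A (Python) =====
-- def rule_string_to_2d_array(rule):
--     ans = []
--     row = []
--     for symbol in rule:
--         if symbol == '/':
--             ans.append(row)
--             row = []
--         else:
--             row.append(symbol)
--     ans.append(row)
--     return ans
-- ===== SOURCE B (Python) =====
-- def rule_string_to_2d_array(rule):
--     return [list(r) for r in rule.split('/')]
-- ===== Notes on version B (the rewrite author's own statement) =====
-- stated objective: simpler
-- what changed: Replaces the char-by-char accumulate-and-flush loop (maintaining a row buffer and branching on the slash delimiter) with str.split followed by a comprehension mapping each row string to its list of characters.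
import Mathlib
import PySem

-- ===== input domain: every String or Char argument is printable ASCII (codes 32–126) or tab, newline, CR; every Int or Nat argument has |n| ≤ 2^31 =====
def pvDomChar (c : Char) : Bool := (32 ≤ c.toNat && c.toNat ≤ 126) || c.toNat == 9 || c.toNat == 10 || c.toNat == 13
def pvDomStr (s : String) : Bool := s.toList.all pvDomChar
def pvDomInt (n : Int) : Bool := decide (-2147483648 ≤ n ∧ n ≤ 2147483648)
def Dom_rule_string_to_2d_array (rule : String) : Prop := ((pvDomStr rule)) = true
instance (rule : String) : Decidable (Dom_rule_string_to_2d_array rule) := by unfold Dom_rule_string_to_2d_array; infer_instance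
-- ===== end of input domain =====

-- B replaces A's char-by-char accumulate-and-flush loop with split('/') followed by a
-- map of each row string to its list of characters (objective: simpler).

-- ===== PORT A =====
-- A: ans = []; row = []; for symbol in rule: if symbol == '/': ans.append(row); row = []
--    else: row.append(symbol); then ans.append(row)
def rule_string_to_2d_array (rule : String) : List (List String) :=
  let st := rule.toList.foldl
    (fun (p : List (List String) × List String) symbol =>
      if symbol = '/' then (p.1 ++ [p.2], []) else (p.1, p.2 ++ [toString symbol]))
    ([], [])
  st.1 ++ [st.2]

-- ===== PORT B =====
-- B: [list(r) for r in rule.split('/')]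
def rule_string_to_2d_array_alt (rule : String) : List (List String) :=
  (PySem.Chars.splitOn rule.toList ['/']).map (fun r => r.map toString)

-- ===== PRECONDITION & SPEC =====
def Spec_rule_string_to_2d_array (rule : String) (out : List (List String)) : Prop := out = rule_string_to_2d_array_alt rule
instance (rule : String) (out : List (List String)) : Decidable (Spec_rule_string_to_2d_array rule out) := by unfold Spec_rule_string_to_2d_array; infer_instance

-- ===== CLAIM (what is proved, stated in full; the proofs are below) =====
def Claim_equal_rule_string_to_2d_array : Prop := ∀ (rule : String), Dom_rule_string_to_2d_array rule → Spec_rule_string_to_2d_array rule (rule_string_to_2d_array rule)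

-- ===== LEMMAS AND PROOFS =====

/-- Prepend `p` to the first block (or start one). -/
def consHead {α : Type} (p : List α) : List (List α) → List (List α)
  | [] => [p]
  | x :: xs => (p ++ x) :: xs

/-- Reference splitter on '/', structural recursion. -/
def split1 : List Char → List (List Char)
  | [] => [[]]
  | c :: cs => if c = '/' then [] :: split1 cs else consHead [c] (split1 cs)

lemma split1_ne_nil (cs : List Char) : split1 cs ≠ [] := by
  cases cs with
  | nil => simp [split1]
  | cons c cs =>
    simp only [split1]
    split_ifs
    · simp
    · cases h : split1 cs <;> simp [consHead]

lemma consHead_nil_of_ne {α : Type} (out : List (List α)) (h : out ≠ []) :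
    consHead [] out = out := by
  cases out with
  | nil => exact absurd rfl h
  | cons x xs => simp [consHead]

lemma consHead_append {α : Type} (p q : List α) (out : List (List α)) :
    consHead (p ++ q) out = consHead p (consHead q out) := by
  cases out <;> simp [consHead]

lemma map_consHead (p : List Char) (out : List (List Char)) :
    (consHead p out).map (fun r => r.map toString) =
    consHead (p.map toString) (out.map (fun r => r.map toString)) := by
  cases out <;> simp [consHead]

/-- `splitOn.go` with enough fuel computes `split1` (sep = "/"). -/
lemma go_eq_split1 (l : List Char) : ∀ (fuel : Nat) (cur : List Char)
    (acc : List (List Char)), l.length < fuel →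
    PySem.Chars.splitOn.go ['/'] fuel l cur acc =
      acc.reverse ++ consHead cur.reverse (split1 l) := by
  induction l with
  | nil =>
    intro fuel cur acc _
    cases fuel <;> simp [PySem.Chars.splitOn.go, split1, consHead]
  | cons c rest ih =>
    intro fuel cur acc hf
    cases fuel with
    | zero => omega
    | succ f =>
      by_cases hc : c = '/'
      · subst hc
        simp only [PySem.Chars.splitOn.go, List.isPrefixOf, beq_self_eq_true,
          Bool.true_and, if_true, List.length_cons, List.length_nil, Nat.zero_add,
          List.drop_succ_cons, List.drop_zero]
        rw [ih f [] (cur.reverse :: acc) (by simpa using Nat.lt_of_succ_lt_succ hf)]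
        rw [List.reverse_nil, consHead_nil_of_ne _ (split1_ne_nil rest)]
        simp [split1, consHead]
      · have hpre : List.isPrefixOf ['/'] (c :: rest) = false := by
          simp [List.isPrefixOf]; exact fun h => (hc h.symm).elim
        simp only [PySem.Chars.splitOn.go, hpre, if_neg, Bool.false_eq_true,
          not_false_eq_true]
        rw [ih f (c :: cur) acc (by simpa using Nat.lt_of_succ_lt_succ hf)]
        simp only [split1, if_neg hc, List.reverse_cons]
        rw [consHead_append]

lemma splitOn_eq_split1 (cs : List Char) :
    PySem.Chars.splitOn cs ['/'] = split1 cs := by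
  unfold PySem.Chars.splitOn
  rw [go_eq_split1 cs (cs.length + 1) [] [] (Nat.lt_succ_self _)]
  simpa using consHead_nil_of_ne _ (split1_ne_nil cs)

/-- A's loop, flushed at the end, equals `split1` mapped to strings. -/
lemma foldA (cs : List Char) : ∀ (ans : List (List String)) (row : List String),
    (let st := cs.foldl
      (fun (p : List (List String) × List String) symbol =>
        if symbol = '/' then (p.1 ++ [p.2], []) else (p.1, p.2 ++ [toString symbol]))
      (ans, row)
     st.1 ++ [st.2]) =
    ans ++ consHead row ((split1 cs).map (fun r => r.map toString)) := by
  induction cs with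
  | nil => intro ans row; simp [split1, consHead]
  | cons c rest ih =>
    intro ans row
    by_cases hc : c = '/'
    · subst hc
      simp only [List.foldl_cons, if_true]
      rw [ih (ans ++ [row]) []]
      rw [consHead_nil_of_ne _ (by
        have := split1_ne_nil rest
        cases h : split1 rest with
        | nil => exact absurd h this
        | cons x xs => simp)]
      simp [split1, consHead]
    · simp only [List.foldl_cons, if_neg hc]
      rw [ih ans (row ++ [toString c])]
      simp only [split1, if_neg hc, map_consHead]
      rw [consHead_append]
      simp

-- ===== VERDICT (by name: the statement is the Claim_ definition above) =====
theorem rule_string_to_2d_array_spec : Claim_equal_rule_string_to_2d_array := by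
  intro rule _
  unfold Spec_rule_string_to_2d_array rule_string_to_2d_array rule_string_to_2d_array_alt
  rw [splitOn_eq_split1, foldA]
  simpa using consHead_nil_of_ne _ (by
    have := split1_ne_nil rule.toList
    cases h : split1 rule.toList with
    | nil => exact absurd h this
    | cons x xs => simp)
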